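-- pv_equiv track=rewrite | github.com/divyu135/ds-algo-python | 2_array/5_max_difference.py | max_difference_sum_subarray_improved
-- ===== SOURCE A (Python) =====
-- def max_difference_sum_subarray_improved( array ):
--     """
--         Time Complexity: O(n)
--         Space Complexity: O(1)
--     """
--     diff = array[1]-array[0]
--
--     current_differnce = diff
--     for i in range(1,len(array)-1):
--         temp_diff = array[i+1]-array[i]
--         if diff > 0:
--             temp_diff = diff + temp_diff
--         current_differnce = max(current_differnce,temp_diff)
--         diff = temp_diff
--     return current_differnce
-- ===== SOURCE B (Python) =====
-- def max_difference_sum_subarray_improved(array):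
--     first, second, *rest = array
--     result = second - first
--     min_so_far = min(first, second)
--     for x in rest:
--         result = max(result, x - min_so_far)
--         min_so_far = min(min_so_far, x)
--     return result
-- ===== Notes on version B (the rewrite author's own statement) =====
-- stated objective: alternative
-- what changed: Replaces Kadane's scan over consecutive differences (state = best sum and running difference-sum) by the telescoping single pass maintaining the running minimum element and max of array[j]-min_so_far.
import Mathlib
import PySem

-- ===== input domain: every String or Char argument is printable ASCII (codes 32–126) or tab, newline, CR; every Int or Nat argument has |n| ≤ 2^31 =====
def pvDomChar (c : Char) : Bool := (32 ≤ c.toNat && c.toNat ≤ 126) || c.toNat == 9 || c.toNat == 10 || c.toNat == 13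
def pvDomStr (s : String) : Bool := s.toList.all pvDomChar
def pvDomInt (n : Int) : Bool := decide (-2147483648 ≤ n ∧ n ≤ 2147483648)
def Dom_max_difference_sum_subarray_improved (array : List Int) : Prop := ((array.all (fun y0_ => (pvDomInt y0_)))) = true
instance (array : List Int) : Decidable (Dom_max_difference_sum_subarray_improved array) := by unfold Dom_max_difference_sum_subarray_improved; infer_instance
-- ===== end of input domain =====

-- B replaces Kadane's scan over consecutive differences by the telescoping single pass
-- that maintains the running minimum element (alternative algorithm, same O(n) cost).


-- ===== PORT A =====
def max_difference_sum_subarray_improved (array : List Int) : Int :=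
  let diff := PySem.List.pyGetD array 1 0 - PySem.List.pyGetD array 0 0
  ((PySem.List.pyRange 1 ((array.length : Int) - 1) 1).foldl
     (fun (s : Int × Int) i =>
        let temp := PySem.List.pyGetD array (i + 1) 0 - PySem.List.pyGetD array i 0
        let temp := if s.2 > 0 then s.2 + temp else temp
        (max s.1 temp, temp))
     (diff, diff)).1

-- ===== PORT B =====
def max_difference_sum_subarray_improved_alt (array : List Int) : Int :=
  match array with
  | first :: second :: rest =>
      (rest.foldl (fun (s : Int × Int) x => (max s.1 (x - s.2), min s.2 x))
         (second - first, min first second)).1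
  | _ => 0

-- ===== PRECONDITION & SPEC =====
-- A raises IndexError (and B ValueError) when the list has fewer than two elements.
def Pre_max_difference_sum_subarray_improved (array : List Int) : Prop := 2 ≤ array.length
instance (array : List Int) : Decidable (Pre_max_difference_sum_subarray_improved array) := by unfold Pre_max_difference_sum_subarray_improved; infer_instance
def pvWitness_max_difference_sum_subarray_improved : List Int := [3, -1, 4, 1]

def Spec_max_difference_sum_subarray_improved (array : List Int) (out : Int) : Prop := out = max_difference_sum_subarray_improved_alt array
instance (array : List Int) (out : Int) : Decidable (Spec_max_difference_sum_subarray_improved array out) := by unfold Spec_max_difference_sum_subarray_improved; infer_instance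

-- ===== CLAIM (what is proved, stated in full; the proofs are below) =====
def Claim_equal_max_difference_sum_subarray_improved : Prop := ∀ (array : List Int), Dom_max_difference_sum_subarray_improved array → Pre_max_difference_sum_subarray_improved array → Spec_max_difference_sum_subarray_improved array (max_difference_sum_subarray_improved array)

-- ===== LEMMAS AND PROOFS =====

/-- A's loop rewritten structurally: fold over the remaining elements, carrying the
previous element (so `x - prev` is the current consecutive difference). -/
def pvFd : List Int → Int → Int × Int → Int × Int
  | [], _, s => s
  | x :: xs, prev, s =>
      let t := if s.2 > 0 then s.2 + (x - prev) else x - prev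
      pvFd xs x (max s.1 t, t)

/-- A's index fold over `range(j, len-1)` equals the structural fold `pvFd` over `array.drop (j+1)`. -/
lemma pvRangeFold (array : List Int) : ∀ (fuel j : Nat), array.length - 1 - j = fuel → 1 ≤ j →
    ∀ s : Int × Int,
    ((PySem.List.pyRange (j : Int) ((array.length : Int) - 1) 1).foldl
       (fun (s : Int × Int) i =>
          let temp := PySem.List.pyGetD array (i + 1) 0 - PySem.List.pyGetD array i 0
          let temp := if s.2 > 0 then s.2 + temp else temp
          (max s.1 temp, temp)) s)
    = pvFd (array.drop (j + 1)) (PySem.List.pyGetD array (j : Int) 0) s := by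
  intro fuel
  induction fuel with
  | zero =>
      intro j hf hj s
      have hb : ((array.length : Int) - 1) ≤ (j : Int) := by omega
      have hr : PySem.List.pyRange (j : Int) ((array.length : Int) - 1) 1 = [] := by
        simp [PySem.List.pyRange_one]
        omega
      have hd : array.drop (j + 1) = [] := by
        apply List.drop_eq_nil_of_le; omega
      simp [hr, hd, pvFd]
  | succ n ih =>
      intro j hf hj s
      have hlt : (j : Int) < (array.length : Int) - 1 := by omega
      rw [PySem.List.pyRange_one_cons hlt]
      have hj1 : j + 1 < array.length := by omega
      have hd : array.drop (j + 1) = array[j + 1] :: array.drop (j + 2) :=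
        List.drop_eq_getElem_cons hj1
      have hg1 : PySem.List.pyGetD array ((j : Int) + 1) 0 = array[j + 1] := by
        have : ((j : Int) + 1) = ((j + 1 : Nat) : Int) := by push_cast; ring
        rw [this, PySem.List.pyGetD_natCast, List.getD_eq_getElem _ _ hj1]
      have hg0 : PySem.List.pyGetD array (j : Int) 0 = array[j] := by
        rw [PySem.List.pyGetD_natCast, List.getD_eq_getElem _ _ (by omega)]
      simp only [List.foldl_cons]
      have hcast : (j : Int) + 1 = ((j + 1 : Nat) : Int) := by push_cast; ring
      have ih' := ih (j + 1) (by omega) (by omega)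
      push_cast at ih' ⊢
      rw [ih']
      rw [hd]
      simp only [pvFd]
      push_cast [hg0, hg1]
      norm_num

/-- Invariant linking the two scans: A's running diff is `prev - mo` (mo = min of the
elements strictly before `prev`) and B's running minimum is `min mo prev`. -/
lemma pvMain : ∀ (xs : List Int) (prev mo cur : Int),
    (pvFd xs prev (cur, prev - mo)).1
    = (xs.foldl (fun (s : Int × Int) x => (max s.1 (x - s.2), min s.2 x)) (cur, min mo prev)).1 := by
  intro xs
  induction xs with
  | nil => intro prev mo cur; rfl
  | cons x xs ih =>
      intro prev mo cur
      have ht : (if prev - mo > 0 then prev - mo + (x - prev) else x - prev) = x - min mo prev := by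
        split_ifs with h <;> omega
      simp only [pvFd, List.foldl_cons, ht]
      have := ih x (min mo prev) (max cur (x - min mo prev))
      rw [show x - min mo prev = x - min mo prev by rfl] at this
      calc (pvFd xs x (max cur (x - min mo prev), x - min mo prev)).1
          = (xs.foldl (fun (s : Int × Int) x => (max s.1 (x - s.2), min s.2 x))
              (max cur (x - min mo prev), min (min mo prev) x)).1 := this
        _ = _ := by rfl

-- ===== VERDICT (by name: the statement is the Claim_ definition above) =====
theorem max_difference_sum_subarray_improved_spec : Claim_equal_max_difference_sum_subarray_improved := by
  intro array _ hpre
  unfold Pre_max_difference_sum_subarray_improved at hpre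
  unfold Spec_max_difference_sum_subarray_improved
  match array, hpre with
  | a0 :: a1 :: rest, _ =>
    unfold max_difference_sum_subarray_improved max_difference_sum_subarray_improved_alt
    have hg0 : PySem.List.pyGetD (a0 :: a1 :: rest) (0 : Int) 0 = a0 := by simp [PySem.List.pyGetD]
    have hg1 : PySem.List.pyGetD (a0 :: a1 :: rest) (1 : Int) 0 = a1 := by simp [PySem.List.pyGetD]
    have hA := pvRangeFold (a0 :: a1 :: rest) rest.length 1 (by simp) (by omega)
      (a1 - a0, a1 - a0)
    push_cast at hA ⊢
    simp only [hg0, hg1]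
    rw [hA]
    simp only [List.drop, hg1]
    exact pvMain rest a1 a0 (a1 - a0)
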